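-- pv_equiv track=rewrite | github.com/xnwang22/leetcode | leetcode.py | get_perms
-- ===== SOURCE A (Python) =====
-- from typing import List
-- from typing import List
--
-- def takeout_one(lst, item):
--     cpy = lst.copy()
--     cpy.remove(item)
--     return cpy
--
-- def get_perms(word_lst: List[str]):
--     if len(word_lst) == 1:
--         return word_lst
--     elif len(word_lst) == 2:
--         return [word_lst[0] + word_lst[1], word_lst[1] + word_lst[0]]
--     else:
--         w = word_lst.copy()
--         w.remove(word_lst[1])
--
--         return [i + item for i in word_lst for item in get_perms(takeout_one(word_lst, i))]
-- ===== SOURCE B (Python) =====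
-- from typing import List
-- from math import factorial
--
-- def perm_at(rem: List[str], x: int) -> str:
--     # the x-th permutation (in A's enumeration order) of rem, via factorial base
--     if not rem:
--         return ''
--     f = factorial(len(rem) - 1)
--     d, x = divmod(x, f)
--     v = rem[d]
--     rest = rem.copy()
--     rest.remove(v)
--     return v + perm_at(rest, x)
--
-- def get_perms(word_lst: List[str]):
--     return [perm_at(word_lst, k) for k in range(factorial(len(word_lst)))]
-- ===== Notes on version B (the rewrite author's own statement) =====
-- stated objective: alternative
-- what changed: Replaces A's branching recursion (pick each word, remove its first occurrence, recurse on all sublists) by direct factorial-number-system indexing: the k-th output string is computed independently for each k in range(n!) by decoding k's factorial-base digits, reproducing A's exact order including duplicate words.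
import Mathlib
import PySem

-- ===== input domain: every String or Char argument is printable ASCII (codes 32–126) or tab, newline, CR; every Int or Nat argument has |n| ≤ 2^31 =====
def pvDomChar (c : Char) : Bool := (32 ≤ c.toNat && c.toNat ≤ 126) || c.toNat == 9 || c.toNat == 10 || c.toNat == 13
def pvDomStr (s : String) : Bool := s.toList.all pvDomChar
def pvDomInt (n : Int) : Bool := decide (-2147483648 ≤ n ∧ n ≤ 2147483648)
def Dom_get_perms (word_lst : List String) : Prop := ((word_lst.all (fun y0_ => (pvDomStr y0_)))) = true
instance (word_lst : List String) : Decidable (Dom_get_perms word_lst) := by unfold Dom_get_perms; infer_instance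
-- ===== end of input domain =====

-- B replaces A's branching recursion by directly computing the k-th permutation string
-- via factorial-base digits (same output order, including duplicate words); alternative algorithm.

-- ===== PORT A =====
def takeout_one (lst : List String) (item : String) : List String :=
  -- cpy = lst.copy(); cpy.remove(item)  (A only calls this with item ∈ lst, so remove? succeeds)
  (PySem.List.remove? lst item).getD lst

-- termination helper for get_perms (cited in decreasing_by)
theorem takeout_one_length_lt (lst : List String) (item : String) (h : item ∈ lst) :
    (takeout_one lst item).length < lst.length := by
  simp [takeout_one, PySem.List.remove?_eq_some_erase lst item h]
  have h1 := List.length_erase_of_mem h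
  have h2 := List.length_pos_of_ne_nil (List.ne_nil_of_mem h)
  omega

def get_perms (word_lst : List String) : List String :=
  if word_lst.length = 1 then word_lst
  else if word_lst.length = 2 then
    [(PySem.List.pyGet? word_lst 0).getD "" ++ (PySem.List.pyGet? word_lst 1).getD "",
     (PySem.List.pyGet? word_lst 1).getD "" ++ (PySem.List.pyGet? word_lst 0).getD ""]
  else
    -- (the 'w = word_lst.copy(); w.remove(word_lst[1])' lines of A are dead code: w is unused)
    word_lst.attach.flatMap
      (fun i => (get_perms (takeout_one word_lst i.1)).map (fun item => i.1 ++ item))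
termination_by word_lst.length
decreasing_by exact takeout_one_length_lt _ _ i.2

-- ===== PORT B =====
-- termination helper for perm_at (cited in decreasing_by)
theorem remove_getD_length_lt (rem : List String) (v : String) (h : rem ≠ []) :
    ((PySem.List.remove? rem v).getD []).length < rem.length := by
  cases hr : PySem.List.remove? rem v with
  | none => simpa using List.length_pos_of_ne_nil h
  | some r =>
    have hv : v ∈ rem := by
      by_contra hv
      rw [(PySem.List.remove?_eq_none_iff rem v).mpr hv] at hr; cases hr
    rw [PySem.List.remove?_eq_some_erase rem v hv] at hr
    cases hr
    have := List.length_erase_of_mem hv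
    have := List.length_pos_of_ne_nil h
    simp; omega

def perm_at (rem : List String) (x : Nat) : String :=
  if h : rem = [] then ""
  else
    let f := Nat.factorial (rem.length - 1)
    let d := x / f
    let x' := x % f
    let v := (PySem.List.pyGet? rem (d : Int)).getD ""
    let rest := (PySem.List.remove? rem v).getD []
    v ++ perm_at rest x'
termination_by rem.length
decreasing_by exact remove_getD_length_lt _ _ h

def get_perms_alt (word_lst : List String) : List String :=
  (List.range (Nat.factorial word_lst.length)).map (fun k => perm_at word_lst k)

-- ===== PRECONDITION & SPEC =====
-- Pre_ excludes only the empty list, on which A raises IndexError (word_lst[1] in the else branch).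
def Pre_get_perms (word_lst : List String) : Prop := word_lst ≠ []
instance (word_lst : List String) : Decidable (Pre_get_perms word_lst) := by unfold Pre_get_perms; infer_instance
def pvWitness_get_perms : List String := (["a", "b"])

def Spec_get_perms (word_lst : List String) (out : List String) : Prop := out = get_perms_alt word_lst
instance (word_lst : List String) (out : List String) : Decidable (Spec_get_perms word_lst out) := by unfold Spec_get_perms; infer_instance

-- ===== CLAIM (what is proved, stated in full; the proofs are below) =====
def Claim_equal_get_perms : Prop := ∀ (word_lst : List String), Dom_get_perms word_lst → Pre_get_perms word_lst → Spec_get_perms word_lst (get_perms word_lst)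

-- ===== LEMMAS AND PROOFS =====

-- range (a*b) splits into a blocks of size b
theorem range_mul_map {α : Type} (a b : Nat) (g : Nat → α) :
    (List.range (a * b)).map g
      = (List.range a).flatMap (fun d => (List.range b).map (fun j => g (d * b + j))) := by
  induction a with
  | zero => simp
  | succ n ih =>
    rw [Nat.succ_mul, List.range_add, List.map_append, ih, List.range_succ, List.flatMap_append]
    simp [List.map_map, Function.comp_def]

-- flatMap over a list = flatMap over its indices
theorem flatMap_eq_range_flatMap {β : Type} (l : List String) (g : String → List β) :
    l.flatMap g = (List.range l.length).flatMap (fun d => g (l.getD d "")) := by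
  induction l with
  | nil => simp
  | cons x xs ih =>
    rw [List.length_cons, List.range_succ_eq_map]
    simp only [List.flatMap_cons, List.flatMap_map, List.getD_cons_zero, List.getD_cons_succ,
      Nat.succ_eq_add_one]
    rw [ih]

-- one factorial-base step of perm_at
theorem perm_at_step (l : List String) (d j : Nat) (hl : l ≠ [])
    (hd : d < l.length) (hj : j < Nat.factorial (l.length - 1)) :
    perm_at l (d * Nat.factorial (l.length - 1) + j)
      = l.getD d "" ++ perm_at (l.erase (l.getD d "")) j := by
  have hf : 0 < Nat.factorial (l.length - 1) := Nat.factorial_pos _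
  have hdiv : (d * Nat.factorial (l.length - 1) + j) / Nat.factorial (l.length - 1) = d := by
    rw [Nat.mul_comm d, Nat.mul_add_div hf, Nat.div_eq_of_lt hj, Nat.add_zero]
  have hmod : (d * Nat.factorial (l.length - 1) + j) % Nat.factorial (l.length - 1) = j := by
    rw [Nat.mul_comm d, Nat.mul_add_mod, Nat.mod_eq_of_lt hj]
  rw [perm_at, dif_neg hl]
  simp only [hdiv, hmod]
  rw [PySem.List.pyGet?_natCast, List.getElem?_eq_getElem hd]
  simp only [Option.getD_some]
  rw [PySem.List.remove?_eq_some_erase l _ (List.getElem_mem hd)]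
  simp only [Option.getD_some]
  rw [List.getD_eq_getElem l "" hd]

-- perm_at of the empty list
theorem perm_at_nil (x : Nat) : perm_at [] x = "" := by
  rw [perm_at]
  simp

-- perm_at of a singleton
theorem perm_at_single (x : String) : perm_at [x] 0 = x := by
  rw [perm_at, dif_neg (by simp)]
  simp [perm_at_nil, String.append_empty]

-- the factorial-base enumeration unfolds one selection level
theorem enum_unfold (l : List String) (hl : l ≠ []) :
    (List.range (Nat.factorial l.length)).map (fun k => perm_at l k)
      = l.flatMap (fun v =>
          ((List.range (Nat.factorial (l.length - 1))).map (fun j => perm_at (l.erase v) j)).map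
            (fun item => v ++ item)) := by
  obtain ⟨m, hm⟩ : ∃ m, l.length = m + 1 :=
    ⟨l.length - 1, (Nat.succ_pred_eq_of_pos (List.length_pos_of_ne_nil hl)).symm⟩
  have hfac : Nat.factorial l.length = l.length * Nat.factorial (l.length - 1) := by
    rw [hm]; simp [Nat.factorial_succ]
  rw [hfac, range_mul_map, flatMap_eq_range_flatMap]
  apply List.flatMap_congr
  intro d hd
  rw [List.mem_range] at hd
  rw [List.map_map]
  apply List.map_congr_left
  intro j hj
  rw [List.mem_range] at hj
  exact perm_at_step l d j hl hd hj

-- A computes exactly the factorial-base enumeration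
theorem get_perms_eq (l : List String) (hl : l ≠ []) :
    get_perms l = (List.range (Nat.factorial l.length)).map (fun k => perm_at l k) := by
  generalize hn : l.length = n
  induction n using Nat.strong_induction_on generalizing l with
  | _ n ih =>
  subst hn
  rw [get_perms, enum_unfold l hl]
  by_cases h1 : l.length = 1
  · obtain ⟨a, rfl⟩ : ∃ a, l = [a] := by
      match l, h1 with | [a], _ => exact ⟨a, rfl⟩
    simp [perm_at_nil, String.append_empty]
  · rw [if_neg h1]
    by_cases h2 : l.length = 2
    · obtain ⟨a, b, rfl⟩ : ∃ a b, l = [a, b] := by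
        match l, h2 with | [a, b], _ => exact ⟨a, b, rfl⟩
      rw [if_pos h2]
      have hab : ([a, b] : List String).erase a = [b] := by simp
      by_cases h : a = b
      · subst h
        simp [perm_at_single, PySem.List.pyGet?, PySem.List.pyIdx?]
      · have hba : ([a, b] : List String).erase b = [a] := by
          rw [List.erase_cons]
          simp [h]
        simp [hab, hba, perm_at_single, PySem.List.pyGet?, PySem.List.pyIdx?]
    · rw [if_neg h2]
      have hlen3 : 3 ≤ l.length := by
        have := List.length_pos_of_ne_nil hl
        omega
      have hattach : l.attach.flatMap
            (fun i => (get_perms (takeout_one l i.1)).map (fun item => i.1 ++ item))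
          = l.flatMap (fun v => (get_perms (takeout_one l v)).map (fun item => v ++ item)) := by
        rw [← List.flatMap_map (fun (i : {x // x ∈ l}) => i.1)
              (fun v => (get_perms (takeout_one l v)).map (fun item => v ++ item)) l.attach,
            List.attach_map_subtype_val]
      rw [hattach]
      apply List.flatMap_congr
      intro v hv
      have htk : takeout_one l v = l.erase v := by
        simp [takeout_one, PySem.List.remove?_eq_some_erase l v hv]
      have herase_len : (l.erase v).length = l.length - 1 := List.length_erase_of_mem hv
      have herase_ne : l.erase v ≠ [] := by
        intro hnil
        rw [hnil] at herase_len
        simp at herase_len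
        omega
      rw [htk, ih (l.length - 1) (by omega) (l.erase v) herase_ne herase_len]

-- ===== VERDICT (by name: the statement is the Claim_ definition above) =====
theorem get_perms_spec : Claim_equal_get_perms := by
  intro l _ hpre
  unfold Spec_get_perms get_perms_alt
  exact get_perms_eq l hpre
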